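-- pv_equiv track=rewrite | github.com/leegonzales/AISkills | FlywheelScan/flywheel-scan/scripts/diff_scans.py | diff_classifications
-- ===== SOURCE A (Python) =====
-- def diff_classifications(prev_triages: dict, curr_triages: dict) -> list[str]:
--     """Find repos that changed classification."""
--     lines = []
--     all_repos = sorted(set(prev_triages) | set(curr_triages))
--
--     for repo in all_repos:
--         prev = prev_triages.get(repo)
--         curr = curr_triages.get(repo)
--
--         if prev and not curr:
--             lines.append(f"| {repo} | {prev['classification']} | **removed** | Repo no longer scanned |")
--         elif curr and not prev:
--             lines.append(f"| {repo} | **new** | {curr['classification']} | New repo added |")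
--         elif prev and curr and prev["classification"] != curr["classification"]:
--             lines.append(
--                 f"| {repo} | {prev['classification']} | {curr['classification']} | {curr.get('rationale', '')[:60]} |"
--             )
--
--     return lines
-- ===== SOURCE B (Python) =====
-- def diff_classifications(prev_triages: dict, curr_triages: dict) -> list[str]:
--     """Find repos that changed classification."""
--     rows = []
--     for repo, prev in prev_triages.items():
--         if prev and not curr_triages.get(repo):
--             rows.append((repo, f"| {repo} | {prev['classification']} | **removed** | Repo no longer scanned |"))
--     for repo, curr in curr_triages.items():
--         prev = prev_triages.get(repo)
--         if curr and not prev: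
--             rows.append((repo, f"| {repo} | **new** | {curr['classification']} | New repo added |"))
--         elif curr and prev and prev["classification"] != curr["classification"]:
--             rows.append((repo, f"| {repo} | {prev['classification']} | {curr['classification']} | {curr.get('rationale', '')[:60]} |"))
--     rows.sort(key=lambda t: t[0])
--     return [line for _, line in rows]
-- ===== Notes on version B (the rewrite author's own statement) =====
-- stated objective: alternative
-- what changed: A makes one pass over the sorted union of both key sets deciding the category of each repo in-line; B instead makes separate category passes over the two dicts themselves, collecting (repo, line) rows unsorted, and sorts the collected rows once at the end.
import Mathlib
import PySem

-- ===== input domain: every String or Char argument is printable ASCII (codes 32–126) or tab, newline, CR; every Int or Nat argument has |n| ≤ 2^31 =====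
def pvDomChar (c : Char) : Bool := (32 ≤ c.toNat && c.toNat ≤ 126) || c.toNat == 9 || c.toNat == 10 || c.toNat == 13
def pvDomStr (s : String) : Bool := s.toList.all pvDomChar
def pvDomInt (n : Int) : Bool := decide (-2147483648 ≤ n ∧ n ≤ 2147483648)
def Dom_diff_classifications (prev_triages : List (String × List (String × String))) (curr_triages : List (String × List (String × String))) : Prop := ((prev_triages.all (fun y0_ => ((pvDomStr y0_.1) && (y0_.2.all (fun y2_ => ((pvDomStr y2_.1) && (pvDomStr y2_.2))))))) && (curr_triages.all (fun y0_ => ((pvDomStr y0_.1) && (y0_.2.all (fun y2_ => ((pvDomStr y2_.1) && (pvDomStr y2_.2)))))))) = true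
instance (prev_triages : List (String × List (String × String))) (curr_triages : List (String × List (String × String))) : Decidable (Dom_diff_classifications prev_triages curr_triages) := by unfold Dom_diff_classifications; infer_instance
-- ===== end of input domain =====

-- B replaces A's single pass over the sorted key union by three category passes over the two
-- dicts themselves, collecting (repo, line) rows and sorting the rows once at the end (objective: alternative).

-- shared primitives mirroring Python built-ins (dict.get, dict truthiness, d['classification'], d.get('rationale',''))
def pvDget {ν : Type} (l : List (String × ν)) (k : String) : Option ν := (PySem.Dict.mk l).get? k
def pvTruthy (o : Option (List (String × String))) : Bool :=
  match o with | some v => !v.isEmpty | none => false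
def pvCls (o : Option (List (String × String))) : String :=
  match o with | some v => (pvDget v "classification").getD "" | none => ""
def pvRat (o : Option (List (String × String))) : String :=
  match o with | some v => (pvDget v "rationale").getD "" | none => ""
-- the three f-strings (identical in both Python sources)
def pvRemovedLine (repo cls : String) : String :=
  "| " ++ repo ++ " | " ++ cls ++ " | **removed** | Repo no longer scanned |"
def pvAddedLine (repo cls : String) : String :=
  "| " ++ repo ++ " | **new** | " ++ cls ++ " | New repo added |"
def pvChangedLine (repo c1 c2 rat : String) : String :=
  "| " ++ repo ++ " | " ++ c1 ++ " | " ++ c2 ++ " | " ++ PySem.Str.slice rat none (some 60) ++ " |"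

-- ===== PORT A =====  (one loop over sorted(set(prev)|set(curr)))
def diff_classifications (prev_triages : List (String × List (String × String))) (curr_triages : List (String × List (String × String))) : List String :=
  let all_repos := PySem.List.sorted
    (PySem.Set.union (PySem.Set.ofList (prev_triages.map Prod.fst)) (PySem.Set.ofList (curr_triages.map Prod.fst)))
    (fun x => x)
  all_repos.foldl (fun lines repo =>
    let prev := pvDget prev_triages repo
    let curr := pvDget curr_triages repo
    if pvTruthy prev && !pvTruthy curr then
      lines ++ [pvRemovedLine repo (pvCls prev)]
    else if pvTruthy curr && !pvTruthy prev then
      lines ++ [pvAddedLine repo (pvCls curr)]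
    else if pvTruthy prev && pvTruthy curr && (pvCls prev != pvCls curr) then
      lines ++ [pvChangedLine repo (pvCls prev) (pvCls curr) (pvRat curr)]
    else lines) []

-- ===== PORT B =====  (two category passes collecting (repo, line) rows, then one sort of the rows)
def diff_classifications_alt (prev_triages : List (String × List (String × String))) (curr_triages : List (String × List (String × String))) : List String :=
  let rows1 := prev_triages.foldl (fun rows pr =>
    if !pr.2.isEmpty && !pvTruthy (pvDget curr_triages pr.1) then
      rows ++ [(pr.1, pvRemovedLine pr.1 (pvCls (some pr.2)))]
    else rows) []
  let rows2 := curr_triages.foldl (fun rows pr =>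
    let prev := pvDget prev_triages pr.1
    if !pr.2.isEmpty && !pvTruthy prev then
      rows ++ [(pr.1, pvAddedLine pr.1 (pvCls (some pr.2)))]
    else if !pr.2.isEmpty && pvTruthy prev && (pvCls prev != pvCls (some pr.2)) then
      rows ++ [(pr.1, pvChangedLine pr.1 (pvCls prev) (pvCls (some pr.2)) (pvRat (some pr.2)))]
    else rows) rows1
  (PySem.List.sorted rows2 (fun t => t.1)).map (fun t => t.2)

-- ===== PRECONDITION & SPEC =====
-- Pre_ requires (a) distinct outer keys — the arguments stand for Python dicts, whose keys are
-- always distinct — and (b) that every non-empty triage dict has a "classification" key: on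
-- inputs violating (b) the Python A raises KeyError (and so does B).
def Pre_diff_classifications (prev_triages : List (String × List (String × String))) (curr_triages : List (String × List (String × String))) : Prop :=
  (prev_triages.map Prod.fst).Nodup ∧ (curr_triages.map Prod.fst).Nodup ∧
  (∀ e ∈ prev_triages, e.2 ≠ [] → "classification" ∈ e.2.map Prod.fst) ∧
  (∀ e ∈ curr_triages, e.2 ≠ [] → "classification" ∈ e.2.map Prod.fst)
instance (prev_triages : List (String × List (String × String))) (curr_triages : List (String × List (String × String))) : Decidable (Pre_diff_classifications prev_triages curr_triages) := by unfold Pre_diff_classifications; infer_instance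

def pvWitness_diff_classifications : (List (String × List (String × String))) × (List (String × List (String × String))) :=
  ([("alpha", [("classification", "keep")]), ("beta", [("classification", "fix")])],
   [("beta", [("classification", "keep"), ("rationale", "better now")])])

def Spec_diff_classifications (prev_triages : List (String × List (String × String))) (curr_triages : List (String × List (String × String))) (out : List String) : Prop := out = diff_classifications_alt prev_triages curr_triages
instance (prev_triages : List (String × List (String × String))) (curr_triages : List (String × List (String × String))) (out : List String) : Decidable (Spec_diff_classifications prev_triages curr_triages out) := by unfold Spec_diff_classifications; infer_instance

-- ===== CLAIM (what is proved, stated in full; the proofs are below) =====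
def Claim_equal_diff_classifications : Prop := ∀ (prev_triages : List (String × List (String × String))) (curr_triages : List (String × List (String × String))), Dom_diff_classifications prev_triages curr_triages → Pre_diff_classifications prev_triages curr_triages → Spec_diff_classifications prev_triages curr_triages (diff_classifications prev_triages curr_triages)

-- ===== LEMMAS AND PROOFS =====

-- the three categories as functions of the repo key (pvG1/pvG2) and of a dict item (pvH1/pvH2)
def pvG1 (p c : List (String × List (String × String))) (r : String) : Option (String × String) :=
  if pvTruthy (pvDget p r) && !pvTruthy (pvDget c r) then
    some (r, pvRemovedLine r (pvCls (pvDget p r)))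
  else none
def pvG2 (p c : List (String × List (String × String))) (r : String) : Option (String × String) :=
  if pvTruthy (pvDget c r) && !pvTruthy (pvDget p r) then
    some (r, pvAddedLine r (pvCls (pvDget c r)))
  else if pvTruthy (pvDget c r) && pvTruthy (pvDget p r) && (pvCls (pvDget p r) != pvCls (pvDget c r)) then
    some (r, pvChangedLine r (pvCls (pvDget p r)) (pvCls (pvDget c r)) (pvRat (pvDget c r)))
  else none
def pvPairFor (p c : List (String × List (String × String))) (r : String) : Option (String × String) :=
  match pvG1 p c r with
  | some x => some x
  | none => pvG2 p c r
def pvH1 (c : List (String × List (String × String))) (pr : String × List (String × String)) : Option (String × String) :=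
  if !pr.2.isEmpty && !pvTruthy (pvDget c pr.1) then
    some (pr.1, pvRemovedLine pr.1 (pvCls (some pr.2)))
  else none
def pvH2 (p : List (String × List (String × String))) (pr : String × List (String × String)) : Option (String × String) :=
  if !pr.2.isEmpty && !pvTruthy (pvDget p pr.1) then
    some (pr.1, pvAddedLine pr.1 (pvCls (some pr.2)))
  else if !pr.2.isEmpty && pvTruthy (pvDget p pr.1) && (pvCls (pvDget p pr.1) != pvCls (some pr.2)) then
    some (pr.1, pvChangedLine pr.1 (pvCls (pvDget p pr.1)) (pvCls (some pr.2)) (pvRat (some pr.2)))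
  else none

lemma pvDget_cons {ν : Type} (k : String) (v : ν) (t : List (String × ν)) (r : String) :
    pvDget ((k, v) :: t) r = if k == r then some v else pvDget t r := by
  simp [pvDget, PySem.Dict.get?_mk_cons]

lemma pvDget_isSome_mem {ν : Type} (l : List (String × ν)) (r : String)
    (h : (pvDget l r).isSome) : r ∈ l.map Prod.fst := by
  induction l with
  | nil => simp [pvDget, PySem.Dict.get?] at h
  | cons hd t ih =>
    rw [show hd = (hd.1, hd.2) from rfl, pvDget_cons hd.1 hd.2 t r] at h
    by_cases hk : hd.1 = r
    · simp [hk]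
    · simp [hk] at h
      simp [ih h]

lemma pvTruthy_isSome (o : Option (List (String × String))) (h : pvTruthy o = true) : o.isSome := by
  cases o <;> simp [pvTruthy] at h ⊢

lemma foldl_append_optToList {α β : Type} (f : α → Option β) :
    ∀ (l : List α) (acc : List β),
      l.foldl (fun a x => a ++ (f x).toList) acc = acc ++ l.filterMap f := by
  intro l
  induction l with
  | nil => simp
  | cons hd t ih =>
    intro acc
    simp only [List.foldl_cons, ih, List.filterMap_cons]
    cases f hd <;> simp

lemma filterMap_eq_filterMap_filter {α β : Type} (g : α → Option β) (l : List α) :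
    l.filterMap g = (l.filter (fun r => (g r).isSome)).filterMap g := by
  induction l with
  | nil => rfl
  | cons hd t ih =>
    cases hh : g hd with
    | none => simp [List.filter_cons, hh, ih]
    | some x => simp [List.filter_cons, hh, ih]

-- two nodup lists with the same members on g's support give permuted filterMaps
lemma filterMap_perm_of_support {α β : Type} [DecidableEq α] (g : α → Option β)
    (xs ys : List α) (hx : xs.Nodup) (hy : ys.Nodup)
    (hmem : ∀ r, (g r).isSome → (r ∈ xs ↔ r ∈ ys)) :
    (xs.filterMap g).Perm (ys.filterMap g) := by
  rw [filterMap_eq_filterMap_filter g xs, filterMap_eq_filterMap_filter g ys]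
  refine List.Perm.filterMap g ?_
  rw [List.perm_ext_iff_of_nodup (hx.filter _) (hy.filter _)]
  intro a
  simp only [List.mem_filter]
  constructor
  · rintro ⟨ha, hs⟩; exact ⟨(hmem a (by simpa using hs)).1 ha, by simpa using hs⟩
  · rintro ⟨ha, hs⟩; exact ⟨(hmem a (by simpa using hs)).2 ha, by simpa using hs⟩

-- assoc-list fusion: iterating a dict's keys and looking each key up is iterating its items
lemma keys_filterMap_eq {ν β : Type} (G : String → Option ν → Option β) :
    ∀ (l : List (String × ν)), (l.map Prod.fst).Nodup →
      (l.map Prod.fst).filterMap (fun r => G r (pvDget l r)) =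
        l.filterMap (fun pr => G pr.1 (some pr.2)) := by
  intro l
  induction l with
  | nil => simp
  | cons hd t ih =>
    intro hn
    simp only [List.map_cons, List.nodup_cons] at hn
    obtain ⟨hni, hnt⟩ := hn
    simp only [List.map_cons, List.filterMap_cons]
    have hhd : pvDget (hd :: t) hd.1 = some hd.2 := by
      rw [show hd = (hd.1, hd.2) from rfl, pvDget_cons]; simp
    have hcongr : (t.map Prod.fst).filterMap (fun r => G r (pvDget (hd :: t) r)) =
        (t.map Prod.fst).filterMap (fun r => G r (pvDget t r)) := by
      refine List.filterMap_congr ?_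
      intro r hr
      have hne : hd.1 ≠ r := fun h => hni (h ▸ hr)
      rw [show hd = (hd.1, hd.2) from rfl, pvDget_cons]
      simp [hne]
    rw [hhd, hcongr, ih hnt]

lemma pairwise_lt_filterMap (p c : List (String × List (String × String))) (xs : List String)
    (hxs : xs.Pairwise (· < ·)) :
    (xs.filterMap (pvPairFor p c)).Pairwise (fun a b => a.1 < b.1) := by
  have hkey : ∀ r x, pvPairFor p c r = some x → x.1 = r := by
    intro r x h
    unfold pvPairFor pvG1 pvG2 at h
    split_ifs at h <;>
      first
        | (injection h with h2; exact (congrArg Prod.fst h2).symm)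
        | simp_all
  induction xs with
  | nil => simp
  | cons hd t ih =>
    rw [List.pairwise_cons] at hxs
    obtain ⟨hhd, ht⟩ := hxs
    simp only [List.filterMap_cons]
    cases h : pvPairFor p c hd with
    | none => exact ih ht
    | some x =>
      refine List.Pairwise.cons ?_ (ih ht)
      intro y hy
      obtain ⟨r, hr, hry⟩ := List.mem_filterMap.1 hy
      rw [hkey hd x h, hkey r y hry]
      exact hhd r hr

lemma disj_g1_g2 (p c : List (String × List (String × String))) :
    ∀ r, (pvG1 p c r).isSome → pvG2 p c r = none := by
  intro r h
  unfold pvG1 at h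
  unfold pvG2
  rcases h1 : pvTruthy (pvDget p r) <;> rcases h2 : pvTruthy (pvDget c r) <;>
    simp [h1, h2] at h ⊢

lemma filterMap_pairFor_perm (p c : List (String × List (String × String))) :
    ∀ (l : List String),
      (l.filterMap (pvPairFor p c)).Perm (l.filterMap (pvG1 p c) ++ l.filterMap (pvG2 p c)) := by
  intro l
  induction l with
  | nil => simp
  | cons hd t ih =>
    simp only [List.filterMap_cons]
    cases hf : pvG1 p c hd with
    | some x =>
      have hg : pvG2 p c hd = none := disj_g1_g2 p c hd (by simp [hf])
      have hp : pvPairFor p c hd = some x := by simp [pvPairFor, hf]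
      simpa [hp, hf, hg] using ih.cons x
    | none =>
      have hp : pvPairFor p c hd = pvG2 p c hd := by simp [pvPairFor, hf]
      cases hg : pvG2 p c hd with
      | none => simpa [hp, hf, hg] using ih
      | some y =>
        simp only [hp, hf, hg]
        exact List.Perm.trans (ih.cons y) List.perm_middle.symm

-- ===== VERDICT (by name: the statement is the Claim_ definition above) =====
theorem diff_classifications_spec : Claim_equal_diff_classifications := by
  intro p c _hdom hpre
  obtain ⟨hnp, hnc, _hclsp, _hclsc⟩ := hpre
  unfold Spec_diff_classifications diff_classifications diff_classifications_alt
  simp only []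
  set Kp := p.map Prod.fst with hKp
  set Kc := c.map Prod.fst with hKc
  set U := PySem.Set.union (PySem.Set.ofList Kp) (PySem.Set.ofList Kc) with hUdef
  set SU := PySem.List.sorted U (fun x => x) with hSUdef
  -- A as a filterMap over the sorted union
  have hA : SU.foldl (fun lines repo =>
      let prev := pvDget p repo
      let curr := pvDget c repo
      if pvTruthy prev && !pvTruthy curr then
        lines ++ [pvRemovedLine repo (pvCls prev)]
      else if pvTruthy curr && !pvTruthy prev then
        lines ++ [pvAddedLine repo (pvCls curr)]
      else if pvTruthy prev && pvTruthy curr && (pvCls prev != pvCls curr) then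
        lines ++ [pvChangedLine repo (pvCls prev) (pvCls curr) (pvRat curr)]
      else lines) []
      = (SU.filterMap (pvPairFor p c)).map Prod.snd := by
    have h1 : ∀ (lines : List String) (r : String), (
        let prev := pvDget p r
        let curr := pvDget c r
        if pvTruthy prev && !pvTruthy curr then
          lines ++ [pvRemovedLine r (pvCls prev)]
        else if pvTruthy curr && !pvTruthy prev then
          lines ++ [pvAddedLine r (pvCls curr)]
        else if pvTruthy prev && pvTruthy curr && (pvCls prev != pvCls curr) then
          lines ++ [pvChangedLine r (pvCls prev) (pvCls curr) (pvRat curr)]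
        else lines)
        = lines ++ (((pvPairFor p c r).map Prod.snd)).toList := by
      intro lines r
      unfold pvPairFor pvG1 pvG2
      rcases h1 : pvTruthy (pvDget p r) <;> rcases h2 : pvTruthy (pvDget c r) <;>
        by_cases h3 : pvCls (pvDget p r) = pvCls (pvDget c r) <;> simp [h1, h2, h3]
    calc SU.foldl _ []
        = SU.foldl (fun lines r => lines ++ ((fun r => (pvPairFor p c r).map Prod.snd) r).toList) [] :=
          List.foldl_ext _ _ [] (fun lines r _ => h1 lines r)
      _ = [] ++ SU.filterMap (fun r => (pvPairFor p c r).map Prod.snd) := foldl_append_optToList _ SU []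
      _ = (SU.filterMap (pvPairFor p c)).map Prod.snd := by
          simp [List.map_filterMap]
  rw [hA]
  -- B's two loops collect the item-level rows
  have hB1 : p.foldl (fun rows pr =>
      if !pr.2.isEmpty && !pvTruthy (pvDget c pr.1) then
        rows ++ [(pr.1, pvRemovedLine pr.1 (pvCls (some pr.2)))]
      else rows) []
      = p.filterMap (pvH1 c) := by
    have h1 : ∀ (rows : List (String × String)) (pr : String × List (String × String)),
        (if !pr.2.isEmpty && !pvTruthy (pvDget c pr.1) then
          rows ++ [(pr.1, pvRemovedLine pr.1 (pvCls (some pr.2)))]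
        else rows) = rows ++ (pvH1 c pr).toList := by
      intro rows pr
      unfold pvH1
      rcases h1 : pr.2.isEmpty <;> rcases h2 : pvTruthy (pvDget c pr.1) <;> simp [h1, h2]
    calc p.foldl _ []
        = p.foldl (fun rows pr => rows ++ (pvH1 c pr).toList) [] :=
          List.foldl_ext _ _ [] (fun rows pr _ => h1 rows pr)
      _ = p.filterMap (pvH1 c) := foldl_append_optToList _ p []
  have hB2 : ∀ init, c.foldl (fun rows pr =>
      let prev := pvDget p pr.1
      if !pr.2.isEmpty && !pvTruthy prev then
        rows ++ [(pr.1, pvAddedLine pr.1 (pvCls (some pr.2)))]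
      else if !pr.2.isEmpty && pvTruthy prev && (pvCls prev != pvCls (some pr.2)) then
        rows ++ [(pr.1, pvChangedLine pr.1 (pvCls prev) (pvCls (some pr.2)) (pvRat (some pr.2)))]
      else rows) init
      = init ++ c.filterMap (pvH2 p) := by
    intro init
    have h1 : ∀ (rows : List (String × String)) (pr : String × List (String × String)),
        (let prev := pvDget p pr.1
        if !pr.2.isEmpty && !pvTruthy prev then
          rows ++ [(pr.1, pvAddedLine pr.1 (pvCls (some pr.2)))]
        else if !pr.2.isEmpty && pvTruthy prev && (pvCls prev != pvCls (some pr.2)) then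
          rows ++ [(pr.1, pvChangedLine pr.1 (pvCls prev) (pvCls (some pr.2)) (pvRat (some pr.2)))]
        else rows) = rows ++ (pvH2 p pr).toList := by
      intro rows pr
      unfold pvH2
      rcases h1 : pr.2.isEmpty <;> rcases h2 : pvTruthy (pvDget p pr.1) <;>
        by_cases h3 : pvCls (pvDget p pr.1) = pvCls (some pr.2) <;> simp [h1, h2, h3]
    calc c.foldl _ init
        = c.foldl (fun rows pr => rows ++ (pvH2 p pr).toList) init :=
          List.foldl_ext _ _ init (fun rows pr _ => h1 rows pr)
      _ = init ++ c.filterMap (pvH2 p) := foldl_append_optToList _ c init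
  rw [hB1, hB2]
  -- the rows B collects are a permutation of A's pairs
  have hUnodup : U.Nodup := PySem.Set.nodup_union _ _ (PySem.Set.nodup_ofList _)
  have hmemU : ∀ r : String, r ∈ U ↔ r ∈ Kp ∨ r ∈ Kc := by
    intro r
    rw [hUdef, PySem.Set.mem_union]
    simp [PySem.Set.mem_ofList]
  have hg1 : Kp.filterMap (pvG1 p c) = p.filterMap (pvH1 c) := by
    have h := keys_filterMap_eq (fun r o => if pvTruthy o && !pvTruthy (pvDget c r) then
      some (r, pvRemovedLine r (pvCls o)) else none) p hnp
    calc Kp.filterMap (pvG1 p c)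
        = (p.map Prod.fst).filterMap (fun r =>
            (fun r o => if pvTruthy o && !pvTruthy (pvDget c r) then
              some (r, pvRemovedLine r (pvCls o)) else none) r (pvDget p r)) :=
          List.filterMap_congr (fun x _ => by simp [pvG1])
      _ = p.filterMap (fun pr =>
            (fun r o => if pvTruthy o && !pvTruthy (pvDget c r) then
              some (r, pvRemovedLine r (pvCls o)) else none) pr.1 (some pr.2)) := h
      _ = p.filterMap (pvH1 c) :=
          List.filterMap_congr (fun pr _ => by simp [pvH1, pvTruthy])
  have hg2 : Kc.filterMap (pvG2 p c) = c.filterMap (pvH2 p) := by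
    have h := keys_filterMap_eq (fun r o =>
      if pvTruthy o && !pvTruthy (pvDget p r) then
        some (r, pvAddedLine r (pvCls o))
      else if pvTruthy o && pvTruthy (pvDget p r) && (pvCls (pvDget p r) != pvCls o) then
        some (r, pvChangedLine r (pvCls (pvDget p r)) (pvCls o) (pvRat o))
      else none) c hnc
    calc Kc.filterMap (pvG2 p c)
        = (c.map Prod.fst).filterMap (fun r =>
            (fun r o =>
              if pvTruthy o && !pvTruthy (pvDget p r) then
                some (r, pvAddedLine r (pvCls o))
              else if pvTruthy o && pvTruthy (pvDget p r) && (pvCls (pvDget p r) != pvCls o) then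
                some (r, pvChangedLine r (pvCls (pvDget p r)) (pvCls o) (pvRat o))
              else none) r (pvDget c r)) :=
          List.filterMap_congr (fun x _ => by simp [pvG2])
      _ = c.filterMap (fun pr =>
            (fun r o =>
              if pvTruthy o && !pvTruthy (pvDget p r) then
                some (r, pvAddedLine r (pvCls o))
              else if pvTruthy o && pvTruthy (pvDget p r) && (pvCls (pvDget p r) != pvCls o) then
                some (r, pvChangedLine r (pvCls (pvDget p r)) (pvCls o) (pvRat o))
              else none) pr.1 (some pr.2)) := h
      _ = c.filterMap (pvH2 p) :=
          List.filterMap_congr (fun pr _ => by simp [pvH2, pvTruthy])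
  have hperm : (SU.filterMap (pvPairFor p c)).Perm
      (p.filterMap (pvH1 c) ++ c.filterMap (pvH2 p)) := by
    refine List.Perm.trans (List.Perm.filterMap _ (PySem.List.sorted_perm U (fun x => x) false)) ?_
    refine List.Perm.trans (filterMap_pairFor_perm p c U) ?_
    refine List.Perm.append ?_ ?_
    · rw [← hg1]
      refine filterMap_perm_of_support (pvG1 p c) U Kp hUnodup hnp ?_
      intro r hr
      have hrp : r ∈ Kp := by
        rcases ht : pvTruthy (pvDget p r) with _ | _
        · exfalso
          unfold pvG1 at hr
          simp [ht] at hr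
        · exact pvDget_isSome_mem p r (pvTruthy_isSome _ ht)
      simp [hmemU r, hrp]
    · rw [← hg2]
      refine filterMap_perm_of_support (pvG2 p c) U Kc hUnodup hnc ?_
      intro r hr
      have hrc : r ∈ Kc := by
        rcases ht : pvTruthy (pvDget c r) with _ | _
        · exfalso
          unfold pvG2 at hr
          simp [ht] at hr
        · exact pvDget_isSome_mem c r (pvTruthy_isSome _ ht)
      simp [hmemU r, hrc]
  -- B's sort re-creates A's sorted order
  have hsorted : PySem.List.sorted ([] ++ (p.filterMap (pvH1 c) ++ c.filterMap (pvH2 p)))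
      (fun t => t.1) = SU.filterMap (pvPairFor p c) := by
    refine PySem.List.sorted_eq_of_perm_of_pairwise_lt _ _ _ (by simpa using hperm) ?_
    refine pairwise_lt_filterMap p c SU ?_
    have hle : SU.Pairwise (fun a b => a ≤ b) := by
      simpa using PySem.List.sorted_pairwise U (fun x => x)
    have hnd : SU.Nodup := ((PySem.List.sorted_perm U (fun x => x) false).nodup_iff).mpr hUnodup
    exact (hle.and hnd).imp (fun h => lt_of_le_of_ne h.1 h.2)
  rw [show ([] : List (String × String)) ++ (p.filterMap (pvH1 c) ++ c.filterMap (pvH2 p))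
    = p.filterMap (pvH1 c) ++ c.filterMap (pvH2 p) from by simp] at hsorted
  rw [hsorted]
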